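-- pv_equiv track=rewrite | github.com/AdamWentworth/PokemonCipher | tools/firered_import/map_importer.py | merge_collision_runs
-- ===== SOURCE A (Python) =====
-- def merge_collision_runs(blocked_grid: list[bool], width: int, height: int, tile_size: int) -> list[tuple[int, int, int, int]]:
--     rectangles = []
--     for y in range(height):
--         x = 0
--         while x < width:
--             idx = y * width + x
--             if not blocked_grid[idx]:
--                 x += 1
--                 continue
--
--             run_start = x
--             while x < width and blocked_grid[y * width + x]:
--                 x += 1
--
--             run_width = x - run_start
--             rectangles.append((run_start * tile_size, y * tile_size, run_width * tile_size, tile_size))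
--     return rectangles
-- ===== SOURCE B (Python) =====
-- def _runs(row):
--     """Run-length encode a row: list of (value, length) for maximal equal runs."""
--     runs = []
--     for b in row:
--         if runs and runs[-1][0] == b:
--             runs[-1] = (b, runs[-1][1] + 1)
--         else:
--             runs.append((b, 1))
--     return runs
--
--
-- def merge_collision_runs(blocked_grid: list[bool], width: int, height: int, tile_size: int) -> list[tuple[int, int, int, int]]:
--     if width <= 0 or height <= 0:
--         return []
--     rectangles = []
--     for y in range(height):
--         row = blocked_grid[y * width:(y + 1) * width]
--         x = 0
--         for value, n in _runs(row):
--             if value: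
--                 rectangles.append((x * tile_size, y * tile_size, n * tile_size, tile_size))
--             x += n
--     return rectangles
-- ===== Notes on version B (the rewrite author's own statement) =====
-- stated objective: alternative
-- what changed: B decomposes each row into a run-length encoding (slice the row out of the grid, RLE it, then emit rectangles from the True runs while advancing an x offset), replacing A's nested index-scanning while loops over the flat grid.
import Mathlib
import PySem

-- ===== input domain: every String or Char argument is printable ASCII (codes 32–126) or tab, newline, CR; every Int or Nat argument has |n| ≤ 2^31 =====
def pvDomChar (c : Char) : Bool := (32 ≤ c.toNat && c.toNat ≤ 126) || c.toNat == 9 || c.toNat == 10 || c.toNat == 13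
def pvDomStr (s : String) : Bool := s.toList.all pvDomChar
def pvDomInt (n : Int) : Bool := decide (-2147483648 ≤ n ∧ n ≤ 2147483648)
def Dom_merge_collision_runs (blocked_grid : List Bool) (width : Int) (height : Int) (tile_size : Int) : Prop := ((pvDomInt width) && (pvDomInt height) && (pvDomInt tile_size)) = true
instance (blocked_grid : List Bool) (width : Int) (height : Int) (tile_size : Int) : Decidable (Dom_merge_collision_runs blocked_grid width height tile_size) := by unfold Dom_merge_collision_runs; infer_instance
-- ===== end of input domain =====

-- B replaces A's nested index-scanning loops by per-row run-length encoding (slice row, RLE, emit True runs); alternative decomposition, same cost.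


-- ===== PORT A =====
-- inner 'while x < width and blocked_grid[y * width + x]: x += 1'
def runEndA (g : List Bool) (width : Int) (y : Int) (x : Nat) : Nat :=
  if h : (x : Int) < width then
    match PySem.List.pyGet? g (y * width + (x : Int)) with
    | some b => if b then runEndA g width y (x + 1) else x
    | none => x  -- Python raises IndexError here; excluded by Pre_
  else x
termination_by width.toNat - x
decreasing_by omega

-- termination helper for scanRowA (cited in its decreasing_by)
theorem le_runEndA (g : List Bool) (width : Int) (y : Int) (x : Nat) :
    x ≤ runEndA g width y x := by
  fun_induction runEndA g width y x with
  | case1 _ _ _ ih => omega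
  | _ => omega

-- body of 'while x < width: …' for one row y
def scanRowA (g : List Bool) (width tile_size : Int) (y : Int) (x : Nat)
    (acc : List (Int × Int × Int × Int)) : List (Int × Int × Int × Int) :=
  if h : (x : Int) < width then
    match hg : PySem.List.pyGet? g (y * width + (x : Int)) with
    | none => acc  -- Python raises IndexError here; excluded by Pre_
    | some b =>
      if hb : b then
        let e := runEndA g width y x
        scanRowA g width tile_size y e
          (acc ++ [((x : Int) * tile_size, y * tile_size, ((e : Int) - (x : Int)) * tile_size, tile_size)])
      else scanRowA g width tile_size y (x + 1) acc
  else acc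
termination_by width.toNat - x
decreasing_by
  · have he : x + 1 ≤ runEndA g width y x := by
      rw [runEndA]; simp only [h, dif_pos, hg, hb, if_pos]
      exact le_runEndA g width y (x + 1)
    omega
  · omega

def merge_collision_runs (blocked_grid : List Bool) (width : Int) (height : Int) (tile_size : Int) : List (Int × Int × Int × Int) :=
  (PySem.List.pyRange 0 height 1).foldl
    (fun rectangles y => scanRowA blocked_grid width tile_size y 0 rectangles) []

-- ===== PORT B =====
-- one step of _runs: extend the last run or start a new one
def pushRun (runs : List (Bool × Nat)) (b : Bool) : List (Bool × Nat) :=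
  match runs.getLast? with
  | some (c, n) => if c == b then runs.dropLast ++ [(b, n + 1)] else runs ++ [(b, 1)]
  | none => runs ++ [(b, 1)]

def rowRuns (row : List Bool) : List (Bool × Nat) :=
  row.foldl pushRun []

-- 'for value, n in _runs(row): if value: rectangles.append(…); x += n'
def emitLoop (y ts : Int) : List (Bool × Nat) → Int → List (Int × Int × Int × Int) → List (Int × Int × Int × Int)
  | [], _, acc => acc
  | (b, n) :: rest, x, acc =>
      emitLoop y ts rest (x + (n : Int))
        (if b then acc ++ [(x * ts, y * ts, (n : Int) * ts, ts)] else acc)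

def merge_collision_runs_alt (blocked_grid : List Bool) (width : Int) (height : Int) (tile_size : Int) : List (Int × Int × Int × Int) :=
  if width ≤ 0 ∨ height ≤ 0 then []
  else
    (PySem.List.pyRange 0 height 1).foldl
      (fun rectangles y =>
        emitLoop y tile_size
          (rowRuns (PySem.List.slice blocked_grid (some (y * width)) (some ((y + 1) * width))))
          0 rectangles) []

-- ===== PRECONDITION & SPEC =====
-- Pre_ excludes exactly the inputs where A raises IndexError: a positive grid
-- shape whose cells are not all present in blocked_grid.
def Pre_merge_collision_runs (blocked_grid : List Bool) (width : Int) (height : Int) (tile_size : Int) : Prop :=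
  0 < width → 0 < height → width * height ≤ (blocked_grid.length : Int)
instance (blocked_grid : List Bool) (width : Int) (height : Int) (tile_size : Int) : Decidable (Pre_merge_collision_runs blocked_grid width height tile_size) := by unfold Pre_merge_collision_runs; infer_instance

def pvWitness_merge_collision_runs : List Bool × Int × Int × Int :=
  ([true, false, true, true], 2, 2, 16)

def Spec_merge_collision_runs (blocked_grid : List Bool) (width : Int) (height : Int) (tile_size : Int) (out : List (Int × Int × Int × Int)) : Prop := out = merge_collision_runs_alt blocked_grid width height tile_size
instance (blocked_grid : List Bool) (width : Int) (height : Int) (tile_size : Int) (out : List (Int × Int × Int × Int)) : Decidable (Spec_merge_collision_runs blocked_grid width height tile_size out) := by unfold Spec_merge_collision_runs; infer_instance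

-- ===== CLAIM (what is proved, stated in full; the proofs are below) =====
def Claim_equal_merge_collision_runs : Prop := ∀ (blocked_grid : List Bool) (width : Int) (height : Int) (tile_size : Int), Dom_merge_collision_runs blocked_grid width height tile_size → Pre_merge_collision_runs blocked_grid width height tile_size → Spec_merge_collision_runs blocked_grid width height tile_size (merge_collision_runs blocked_grid width height tile_size)


-- ===== LEMMAS AND PROOFS =====

-- cons-structured run-length encoding (proof-side characterisation of rowRuns)
def consRuns (b : Bool) : List (Bool × Nat) → List (Bool × Nat)
  | [] => [(b, 1)]
  | (c, n) :: r => if b == c then (b, n + 1) :: r else (b, 1) :: (c, n) :: r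

def runsRec : List Bool → List (Bool × Nat)
  | [] => []
  | b :: t => consRuns b (runsRec t)

-- how pushRun (append-at-end) relates to consRuns (prepend)
def combine (acc : List (Bool × Nat)) : List (Bool × Nat) → List (Bool × Nat)
  | [] => acc
  | (c, m) :: r =>
    match acc.getLast? with
    | some (d, n) => if d == c then acc.dropLast ++ (c, n + m) :: r else acc ++ (c, m) :: r
    | none => (c, m) :: r

theorem combine_nil (rs : List (Bool × Nat)) : combine [] rs = rs := by
  cases rs with
  | nil => rfl
  | cons p r => obtain ⟨c, m⟩ := p; simp [combine]

theorem combine_push (acc : List (Bool × Nat)) (b : Bool) (rs : List (Bool × Nat)) :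
    combine (pushRun acc b) rs = combine acc (consRuns b rs) := by
  rcases List.eq_nil_or_concat acc with rfl | ⟨as, ⟨d, n⟩, rfl⟩
  · cases rs with
    | nil => simp [pushRun, combine, consRuns]
    | cons p r =>
      obtain ⟨c, m⟩ := p
      by_cases hbc : b = c
      · subst hbc; simp [pushRun, combine, consRuns, Nat.add_comm]
      · simp [pushRun, combine, consRuns, hbc, Ne.symm hbc]
  · by_cases hdb : d = b
    · subst hdb
      cases rs with
      | nil => simp [pushRun, combine, consRuns, List.getLast?_concat, List.dropLast_concat]
      | cons p r =>
        obtain ⟨c, m⟩ := p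
        by_cases hbc : d = c
        · subst hbc
          simp [pushRun, combine, consRuns]
          omega
        · simp [pushRun, combine, consRuns, List.getLast?_concat, List.dropLast_concat, hbc, Ne.symm hbc]
    · cases rs with
      | nil => simp [pushRun, combine, consRuns, List.getLast?_concat, List.dropLast_concat, hdb]
      | cons p r =>
        obtain ⟨c, m⟩ := p
        by_cases hbc : b = c
        · subst hbc
          simp [pushRun, combine, consRuns, List.getLast?_concat, List.dropLast_concat, hdb, Nat.add_comm]
        · simp [pushRun, combine, consRuns, List.getLast?_concat, List.dropLast_concat, hdb, hbc, Ne.symm hbc]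

theorem foldl_pushRun (l : List Bool) (acc : List (Bool × Nat)) :
    l.foldl pushRun acc = combine acc (runsRec l) := by
  induction l generalizing acc with
  | nil => simp [runsRec, combine]
  | cons b t ih => simp only [List.foldl_cons, ih, runsRec, combine_push]

theorem runsRec_cons_shape (b : Bool) (t : List Bool) :
    ∃ m r', runsRec (b :: t) = (b, m) :: r' := by
  show ∃ m r', consRuns b (runsRec t) = (b, m) :: r'
  cases h : runsRec t with
  | nil => exact ⟨1, [], rfl⟩
  | cons p r =>
    obtain ⟨c, n⟩ := p
    by_cases hbc : b = c
    · subst hbc; exact ⟨n + 1, r, by simp [consRuns]⟩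
    · exact ⟨1, (c, n) :: r, by simp [consRuns, hbc]⟩

theorem runsRec_true (t : List Bool) :
    runsRec (true :: t) = (true, 1 + (t.takeWhile (fun b => b)).length) :: runsRec (t.dropWhile (fun b => b)) := by
  induction t with
  | nil => simp [runsRec, consRuns]
  | cons a t' ih =>
    cases a with
    | true =>
      show consRuns true (runsRec (true :: t')) = _
      rw [ih]
      simp [consRuns, List.takeWhile_cons, List.dropWhile_cons]
      omega
    | false =>
      obtain ⟨m, r', h⟩ := runsRec_cons_shape false t'
      show consRuns true (runsRec (false :: t')) = _
      rw [h]
      simp [consRuns, List.takeWhile_cons, List.dropWhile_cons, ← h]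

theorem dropWhile_eq_drop_tw (p : Bool → Bool) (l : List Bool) :
    l.dropWhile p = l.drop (l.takeWhile p).length := by
  induction l with
  | nil => rfl
  | cons a t ih =>
    by_cases h : p a
    · simp [List.dropWhile_cons, List.takeWhile_cons, h, ih]
    · simp [List.dropWhile_cons, List.takeWhile_cons, h]

theorem emitLoop_consRuns_false (y ts : Int) (rs : List (Bool × Nat)) (x : Int) (acc : List (Int × Int × Int × Int)) :
    emitLoop y ts (consRuns false rs) x acc = emitLoop y ts rs (x + 1) acc := by
  cases rs with
  | nil => simp [consRuns, emitLoop]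
  | cons p r =>
    obtain ⟨c, n⟩ := p
    cases c with
    | false =>
      simp only [consRuns, Bool.false_eq_true, beq_self_eq_true, if_true, emitLoop,
        Bool.false_eq_true, if_false]
      rw [show x + ((n + 1 : Nat) : Int) = x + 1 + (n : Int) by push_cast; ring]
    | true =>
      simp [consRuns, emitLoop]

theorem runEndA_eq (g : List Bool) (width y : Int) (r : List Bool)
    (hw : r.length = width.toNat)
    (hg : ∀ (k : Nat), k < r.length → PySem.List.pyGet? g (y * width + (k : Int)) = r[k]?) :
    ∀ (n x : Nat), r.length - x ≤ n → x ≤ r.length →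
      runEndA g width y x = x + ((r.drop x).takeWhile (fun b => b)).length := by
  intro n
  induction n with
  | zero =>
    intro x hn hx
    have hxe : x = r.length := by omega
    rw [runEndA]
    have : ¬ ((x : Int) < width) := by omega
    rw [dif_neg this]
    subst hxe
    simp [List.drop_length]
  | succ n ih =>
    intro x hn hx
    rcases Nat.lt_or_ge x r.length with hlt | hge
    · have hcond : (x : Int) < width := by omega
      have hdrop : r.drop x = r[x] :: r.drop (x + 1) := (List.getElem_cons_drop hlt).symm
      rw [runEndA]
      rw [dif_pos hcond, hg x hlt, List.getElem?_eq_getElem hlt]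
      cases hrx : r[x] with
      | true =>
        simp only [if_true]
        rw [ih (x+1) (by omega) (by omega), hdrop, hrx]
        simp [List.takeWhile_cons]
        omega
      | false =>
        simp only [Bool.false_eq_true, if_false]
        rw [hdrop, hrx]
        simp [List.takeWhile_cons]
    · have hxe : x = r.length := by omega
      rw [runEndA]
      have : ¬ ((x : Int) < width) := by omega
      rw [dif_neg this]
      subst hxe
      simp [List.drop_length]

theorem scanRow_eq (g : List Bool) (width ts y : Int) (r : List Bool)
    (hw : r.length = width.toNat)
    (hg : ∀ (k : Nat), k < r.length → PySem.List.pyGet? g (y * width + (k : Int)) = r[k]?) :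
    ∀ (n x : Nat) (acc : List (Int × Int × Int × Int)), r.length - x ≤ n → x ≤ r.length →
      scanRowA g width ts y x acc = emitLoop y ts (runsRec (r.drop x)) (x : Int) acc := by
  intro n
  induction n with
  | zero =>
    intro x acc hn hx
    have hxe : x = r.length := by omega
    rw [scanRowA]
    have hc : ¬ ((x : Int) < width) := by omega
    rw [dif_neg hc]
    subst hxe
    simp [List.drop_length, runsRec, emitLoop]
  | succ n ih =>
    intro x acc hn hx
    rcases Nat.lt_or_ge x r.length with hlt | hge
    · have hcond : (x : Int) < width := by omega
      have hdrop : r.drop x = r[x] :: r.drop (x + 1) := (List.getElem_cons_drop hlt).symm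
      have hget : PySem.List.pyGet? g (y * width + (x : Int)) = some r[x] := by
        rw [hg x hlt, List.getElem?_eq_getElem hlt]
      rw [scanRowA]
      rw [dif_pos hcond]
      split
      · simp_all
      · rename_i b hb
        have hbr : b = r[x] := by rw [hget] at hb; exact (Option.some.inj hb).symm
        subst hbr
        cases hrx : r[x] with
        | false =>
          simp only [Bool.false_eq_true, dif_neg, reduceDIte]
          rw [ih (x + 1) acc (by omega) (by omega)]
          rw [hdrop, hrx]
          show _ = emitLoop y ts (consRuns false (runsRec (r.drop (x + 1)))) (x : Int) acc
          rw [emitLoop_consRuns_false]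
          push_cast
          ring_nf
        | true =>
          simp only [reduceDIte]
          set k : Nat := ((r.drop x).takeWhile (fun b => b)).length with hk
          have hkd : r.drop x = true :: r.drop (x + 1) := by rw [hdrop, hrx]
          have hk1 : k = 1 + ((r.drop (x + 1)).takeWhile (fun b => b)).length := by
            rw [hk, hkd]; simp [List.takeWhile_cons]; omega
          have hklen : k ≤ r.length - x := by
            have h1 : k ≤ (r.drop x).length := by
              rw [hk]; exact (List.takeWhile_sublist _).length_le
            simpa [List.length_drop] using h1
          have he : runEndA g width y x = x + k :=
            runEndA_eq g width y r hw hg (r.length - x) x (le_refl _) (by omega)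
          rw [he]
          -- right-hand side: unfold one run of runsRec
          have hrun : runsRec (r.drop x)
              = (true, k) :: runsRec (r.drop (x + k)) := by
            rw [hkd, runsRec_true, ← hk1]
            have h2 : List.dropWhile (fun b => b) (List.drop (x + 1) r) = List.drop (x + k) r := by
              rw [dropWhile_eq_drop_tw, List.drop_drop]
              congr 1
              omega
            rw [h2]
          rw [hrun]
          show scanRowA g width ts y (x + k) _ = emitLoop y ts (runsRec (r.drop (x + k))) ((x : Int) + (k : Int)) _
          rw [ih (x + k) _ (by omega) (by omega)]
          have hcast : (((x + k : Nat)) : Int) = (x : Int) + (k : Int) := by push_cast; ring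
          rw [hcast]
          congr 2
          push_cast
          ring
    · have hxe : x = r.length := by omega
      rw [scanRowA]
      have hc : ¬ ((x : Int) < width) := by omega
      rw [dif_neg hc]
      subst hxe
      simp [List.drop_length, runsRec, emitLoop]

theorem foldl_id {α β : Type} (l : List α) (init : β) :
    l.foldl (fun acc _ => acc) init = init := by
  induction l generalizing init with
  | nil => rfl
  | cons a t ih => simpa using ih init

theorem rowRuns_eq_runsRec (row : List Bool) : rowRuns row = runsRec row := by
  rw [rowRuns, foldl_pushRun, combine_nil]

-- ===== VERDICT (by name: the statement is the Claim_ definition above) =====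
theorem merge_collision_runs_spec : Claim_equal_merge_collision_runs := by
  intro g width height ts _ hpre
  unfold Spec_merge_collision_runs merge_collision_runs merge_collision_runs_alt
  by_cases hdeg : width ≤ 0 ∨ height ≤ 0
  · rw [if_pos hdeg]
    rcases hdeg with hw | hh
    · rw [PySem.List.foldl_congr_mem _ _ (fun acc _ => acc) []
        (by
          intro acc y _
          rw [scanRowA, dif_neg (by push_cast; omega)])]
      exact foldl_id _ _
    · rw [PySem.List.pyRange_one_eq_nil hh]
      rfl
  · push_neg at hdeg
    obtain ⟨hw, hh⟩ := hdeg
    rw [if_neg (by push_neg; exact ⟨hw, hh⟩)]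
    apply PySem.List.foldl_congr_mem
    intro acc y hy
    obtain ⟨hy0, hyh⟩ := PySem.List.mem_pyRange_one.mp hy
    have hlen : width * height ≤ (g.length : Int) := hpre hw hh
    have hq : (y + 1) * width = y * width + width := by ring
    have hyw0 : 0 ≤ y * width := mul_nonneg hy0 (le_of_lt hw)
    have hle : (y + 1) * width ≤ width * height := by
      have h1 : y + 1 ≤ height := by omega
      calc (y + 1) * width ≤ height * width :=
            mul_le_mul_of_nonneg_right h1 (le_of_lt hw)
        _ = width * height := mul_comm _ _
    set r := PySem.List.slice g (some (y * width)) (some ((y + 1) * width)) with hrdef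
    have hreq : r = List.take (((y + 1) * width).toNat - (y * width).toNat) (List.drop (y * width).toNat g) :=
      PySem.List.slice_of_nonneg g hyw0 (by omega) (by omega) (by omega)
    have hrl : r.length = width.toNat := by
      rw [hreq]
      rw [List.length_take, List.length_drop]
      rw [hq] at hle ⊢
      omega
    have hg : ∀ (k : Nat), k < r.length → PySem.List.pyGet? g (y * width + (k : Int)) = r[k]? := by
      intro k hk
      rw [hrl] at hk
      rw [PySem.List.pyGet?_of_nonneg g (by omega)]
      have hkk : k < ((y + 1) * width).toNat - (y * width).toNat := by
        rw [hq]
        omega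
      rw [hreq, List.getElem?_take_of_lt hkk, List.getElem?_drop]
      congr 1
      omega
    have hmain := scanRow_eq g width ts y r hrl hg r.length 0 acc (by omega) (by omega)
    rw [hmain, rowRuns_eq_runsRec]
    simp
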